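-- pv_equiv track=rewrite | github.com/averyfairbanks/coding-exercise_3-21-21 | third_optimized.py | times_repeated
-- ===== SOURCE A (Python) =====
-- def times_repeated(s, t):
--     if not contains_chars(s, t):
--             return -1
--
--     times = 0
--     i = 0
--     for ch in t:
--         times_on_enter = times
--         while times <= times_on_enter + 1:
--             if i == 0:
--                 times += 1
--             if s[i] == ch:
--                 i = (i + 1) % len(s)
--                 break
--             i = (i + 1) % len(s)
--
--     return times
--
-- def contains_chars(s, t):
--     d = set()
--     for ch in s:
--         if ch not in d:
--             d.add(ch)
--
--     for ch in t:
--         if ch not in d: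
--             return False
--     return True
-- ===== SOURCE B (Python) =====
-- def times_repeated(s, t):
--     # index every char of s once, then resolve each char of t by binary search
--     occ = {}
--     for i, ch in enumerate(s):
--         if ch in occ:
--             occ[ch].append(i)
--         else:
--             occ[ch] = [i]
--     times = 0
--     pos = 0
--     for ch in t:
--         if ch not in occ:
--             return -1
--         lst = occ[ch]
--         if pos == 0:
--             times += 1
--         # first index in lst whose value is >= pos (binary search; no bisect import in this module)
--         lo, hi = 0, len(lst)
--         while lo < hi:
--             mid = (lo + hi) // 2
--             if lst[mid] < pos:
--                 lo = mid + 1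
--             else:
--                 hi = mid
--         if lo == len(lst):
--             times += 1
--             idx = lst[0]
--         else:
--             idx = lst[lo]
--         pos = (idx + 1) % len(s)
--     return times
-- ===== Notes on version B (the rewrite author's own statement) =====
-- stated objective: alternative
-- what changed: Replaces the per-character cyclic scan of s (nested while loop with wrap counting) by a precomputed occurrence index per character plus binary search over the occurrence lists.
import Mathlib
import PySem

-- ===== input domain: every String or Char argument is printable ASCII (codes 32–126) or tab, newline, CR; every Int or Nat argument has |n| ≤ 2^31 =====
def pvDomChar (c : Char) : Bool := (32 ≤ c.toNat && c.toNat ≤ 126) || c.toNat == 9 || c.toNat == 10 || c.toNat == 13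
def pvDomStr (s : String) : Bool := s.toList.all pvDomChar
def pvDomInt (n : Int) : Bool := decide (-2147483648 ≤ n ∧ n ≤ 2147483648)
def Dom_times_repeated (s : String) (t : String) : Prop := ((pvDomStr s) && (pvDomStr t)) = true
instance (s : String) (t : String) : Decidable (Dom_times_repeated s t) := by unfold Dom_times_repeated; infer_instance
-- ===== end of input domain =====

-- B replaces A's per-character cyclic scan of s by a precomputed per-character occurrence index
-- plus binary search over the occurrence lists (objective: alternative algorithm).

-- ===== PORT A =====
-- contains_chars(s, t)
def pvContainsChars (sl tl : List Char) : Bool :=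
  let d : PySem.Set Char :=
    sl.foldl (fun d ch => if PySem.Set.contains d ch then d else PySem.Set.add d ch) PySem.Set.empty
  tl.all (fun ch => PySem.Set.contains d ch)

-- the inner `while times <= times_on_enter + 1` loop; the fuel only bounds Lean's recursion
-- (the Python loop provably exits within 2*len(s)+2 iterations whenever it is reached).
-- The `none` branch is where Python's s[i] would raise IndexError (s empty) — unreachable,
-- since A reaches the loop only after contains_chars guaranteed every ch of t occurs in s.
def pvWhile (sl : List Char) (ch : Char) (tOE : Int) : Nat → Int × Int → Int × Int
  | 0, st => st
  | fuel+1, (times, i) =>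
    if times ≤ tOE + 1 then
      let times1 := if i == 0 then times + 1 else times
      match PySem.List.pyGet? sl i with
      | none => (times1, i)
      | some c =>
        if c == ch then (times1, PySem.Int.mod (i+1) (sl.length : Int))
        else pvWhile sl ch tOE fuel (times1, PySem.Int.mod (i+1) (sl.length : Int))
    else (times, i)

def times_repeated (s : String) (t : String) : Int :=
  let sl := s.toList
  let tl := t.toList
  if pvContainsChars sl tl then
    (tl.foldl (fun (st : Int × Int) ch => pvWhile sl ch st.1 (2 * sl.length + 2) st) ((0:Int), (0:Int))).1
  else -1

-- ===== PORT B =====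
-- occ = {}; for i, ch in enumerate(s): append i to occ[ch] (or start a new list)
def pvBuildOcc (sl : List Char) : PySem.Dict Char (List Int) :=
  (PySem.List.enumerate sl 0).foldl
    (fun d p =>
      if d.contains p.2 then d.insert p.2 ((d.getD p.2 []) ++ [p.1])
      else d.insert p.2 [p.1])
    PySem.Dict.empty

-- the hand-written `while lo < hi` binary search of Source B (first index in lst with value >= pos);
-- lst[mid] is in range (mid < hi <= len) so pyGetD is exact there.
def pvBisect (lst : List Int) (pos : Int) (lo hi : Nat) : Nat :=
  if _h : lo < hi then
    let mid := (lo + hi) / 2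
    if PySem.List.pyGetD lst (mid : Int) 0 < pos then pvBisect lst pos (mid+1) hi
    else pvBisect lst pos lo mid
  else lo
  termination_by hi - lo
  decreasing_by all_goals omega

-- the `for ch in t` loop of Source B, with its early `return -1`
def pvAltLoop (sl : List Char) (occ : PySem.Dict Char (List Int)) : List Char → Int → Int → Int
  | [], times, _ => times
  | ch :: rest, times, pos =>
    match occ.get? ch with
    | none => -1
    | some lst =>
      let times1 := if pos == 0 then times + 1 else times
      let lo := pvBisect lst pos 0 lst.length
      if lo == lst.length then
        pvAltLoop sl occ rest (times1 + 1)
          (PySem.Int.mod (PySem.List.pyGetD lst (0:Int) 0 + 1) (sl.length : Int))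
      else
        pvAltLoop sl occ rest times1
          (PySem.Int.mod (PySem.List.pyGetD lst (lo:Int) 0 + 1) (sl.length : Int))

def times_repeated_alt (s : String) (t : String) : Int :=
  let sl := s.toList
  pvAltLoop sl (pvBuildOcc sl) t.toList 0 0

-- ===== PRECONDITION & SPEC =====
def Spec_times_repeated (s : String) (t : String) (out : Int) : Prop := out = times_repeated_alt s t
instance (s : String) (t : String) (out : Int) : Decidable (Spec_times_repeated s t out) := by unfold Spec_times_repeated; infer_instance

-- ===== CLAIM (what is proved, stated in full; the proofs are below) =====
def Claim_equal_times_repeated : Prop := ∀ (s : String) (t : String), Dom_times_repeated s t → Spec_times_repeated s t (times_repeated s t)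

-- ===== LEMMAS AND PROOFS =====

-- the (strictly increasing) list of positions of ch in sl, as Python ints
def occList (sl : List Char) (ch : Char) : List Int :=
  (PySem.List.enumerate sl 0).filterMap (fun p => if p.2 == ch then some p.1 else none)

theorem mem_occList (sl : List Char) (ch : Char) (y : Int) :
    y ∈ occList sl ch ↔ ∃ (k : Nat) (hk : k < sl.length), y = (k : Int) ∧ sl[k] = ch := by
  unfold occList
  rw [List.mem_filterMap]
  constructor
  · rintro ⟨p, hp, hf⟩
    rw [PySem.List.mem_enumerate_iff] at hp
    obtain ⟨k, hk, rfl⟩ := hp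
    by_cases h : sl[k] = ch
    · simp only [h, BEq.rfl, if_true, Option.some.injEq] at hf
      exact ⟨k, hk, by omega, h⟩
    · simp [h] at hf
  · rintro ⟨k, hk, rfl, hch⟩
    refine ⟨((0:Int) + (k : Int), sl[k]), ?_, by simp [hch]⟩
    rw [PySem.List.mem_enumerate_iff]
    exact ⟨k, hk, rfl⟩

theorem pairwise_occList (sl : List Char) (ch : Char) :
    (occList sl ch).Pairwise (· < ·) := by
  unfold occList
  rw [List.pairwise_filterMap]
  refine (PySem.List.pairwise_lt_enumerate sl 0).imp ?_
  intro p q hpq b hb b' hb'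
  by_cases h : p.2 = ch
  · by_cases h' : q.2 = ch
    · simp only [h, h', BEq.rfl, if_true, Option.some.injEq] at hb hb'
      omega
    · simp [h'] at hb'
  · simp [h] at hb

theorem occList_append (xs : List Char) (x ch : Char) :
    occList (xs ++ [x]) ch = occList xs ch ++ (if x = ch then [(xs.length : Int)] else []) := by
  unfold occList
  rw [PySem.List.enumerate_append, List.filterMap_append]
  congr 1
  rw [PySem.List.enumerate_cons, PySem.List.enumerate_nil]
  by_cases h : x = ch <;> simp [h]

theorem occList_nil_of_not_mem (sl : List Char) (ch : Char) (h : ch ∉ sl) :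
    occList sl ch = [] := by
  rw [List.eq_nil_iff_forall_not_mem]
  intro y hy
  rw [mem_occList] at hy
  obtain ⟨k, hk, _, hch⟩ := hy
  exact h (hch ▸ List.getElem_mem hk)

theorem buildOcc_get? (sl : List Char) (ch : Char) :
    (pvBuildOcc sl).get? ch = if ch ∈ sl then some (occList sl ch) else none := by
  induction sl using List.reverseRecOn generalizing ch with
  | nil => simp [pvBuildOcc, PySem.List.enumerate_nil, PySem.Dict.get?_empty]
  | append_singleton xs x ih =>
    have hstep : pvBuildOcc (xs ++ [x]) =
        (if (pvBuildOcc xs).contains x then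
          (pvBuildOcc xs).insert x (((pvBuildOcc xs).getD x []) ++ [((0:Int) + (xs.length : Int))])
        else (pvBuildOcc xs).insert x [((0:Int) + (xs.length : Int))]) := by
      unfold pvBuildOcc
      rw [PySem.List.enumerate_append, List.foldl_append, PySem.List.enumerate_cons,
        PySem.List.enumerate_nil]
      rfl
    rw [hstep]
    have hcont : (pvBuildOcc xs).contains x = decide (x ∈ xs) := by
      rw [PySem.Dict.contains_eq_isSome_get?, ih x]
      by_cases h : x ∈ xs <;> simp [h]
    have hget : (pvBuildOcc xs).getD x [] = occList xs x := by
      rw [PySem.Dict.getD_eq_get?_getD, ih x]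
      by_cases h : x ∈ xs
      · simp [h]
      · simp [h, occList_nil_of_not_mem xs x h]
    by_cases hcx : ch = x
    · subst hcx
      rw [hcont]
      by_cases h : ch ∈ xs <;>
        simp [h, PySem.Dict.get?_insert_self, hget, occList_append, zero_add,
          occList_nil_of_not_mem]
    · have hne := hcx
      rw [hcont]
      by_cases h : x ∈ xs <;>
        simp [h, PySem.Dict.get?_insert_of_ne _ _ hcx, ih ch, occList_append,
          List.mem_append, hcx, Ne.symm hcx]

theorem pvBisect_spec (lst : List Int) (pos : Int) (hs : lst.Pairwise (· < ·)) :
    ∀ (fuel lo hi : Nat), hi - lo ≤ fuel → lo ≤ hi → hi ≤ lst.length →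
    (∀ (j : Nat) (hj : j < lst.length), j < lo → lst[j] < pos) →
    (∀ (j : Nat) (hj : j < lst.length), hi ≤ j → pos ≤ lst[j]) →
    lo ≤ pvBisect lst pos lo hi ∧ pvBisect lst pos lo hi ≤ hi ∧
    (∀ (j : Nat) (hj : j < lst.length), j < pvBisect lst pos lo hi → lst[j] < pos) ∧
    (∀ (j : Nat) (hj : j < lst.length), pvBisect lst pos lo hi ≤ j → pos ≤ lst[j]) := by
  intro fuel
  induction fuel with
  | zero =>
    intro lo hi hf hlh _ hlow hhigh
    have : lo = hi := by omega
    subst this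
    rw [pvBisect]
    simp only [lt_irrefl, dite_false]
    exact ⟨le_refl _, le_refl _, hlow, hhigh⟩
  | succ f ihf =>
    intro lo hi hf hlh hhl hlow hhigh
    rw [pvBisect]
    by_cases h : lo < hi
    · simp only [h, dite_true]
      have hmid1 : lo ≤ (lo + hi) / 2 := by omega
      have hmid2 : (lo + hi) / 2 < hi := by omega
      have hmlt : (lo + hi) / 2 < lst.length := by omega
      have hget : PySem.List.pyGetD lst (((lo + hi) / 2 : Nat) : Int) 0 = lst[(lo + hi) / 2] :=
        PySem.List.pyGetD_ofNat lst _ 0 hmlt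
      rw [hget]
      by_cases hc : lst[(lo + hi) / 2] < pos
      · simp only [hc, if_true]
        refine (ihf ((lo + hi) / 2 + 1) hi (by omega) (by omega) hhl ?_ hhigh).imp ?_ id
        · intro j hj hjlt
          have : lst[j] ≤ lst[(lo + hi) / 2] := by
            rcases Nat.lt_or_ge j ((lo + hi) / 2) with hlt | hge
            · exact le_of_lt ((List.pairwise_iff_getElem.mp hs) j _ hj hmlt hlt)
            · have : j = (lo + hi) / 2 := by omega
              subst this; exact le_refl _
          omega
        · intro hle; omega
      · simp only [hc, if_false]
        have := ihf lo ((lo + hi) / 2) (by omega) (by omega) (by omega) hlow ?_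
        · exact ⟨this.1, by omega, this.2.2⟩
        · intro j hj hjge
          have : lst[(lo + hi) / 2] ≤ lst[j] := by
            rcases Nat.lt_or_ge ((lo + hi) / 2) j with hlt | hge
            · exact le_of_lt ((List.pairwise_iff_getElem.mp hs) _ j hmlt hj hlt)
            · have : j = (lo + hi) / 2 := by omega
              subst this; exact le_refl _
          omega
    · simp only [h, dite_false]
      have : lo = hi := by omega
      subst this
      exact ⟨le_refl _, le_refl _, hlow, hhigh⟩

theorem pvWhile_found (sl : List Char) (ch : Char) (tOE : Int) (j0 : Nat)
    (hj : j0 < sl.length) (hch : sl[j0] = ch) :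
    ∀ (fuel i : Nat) (times : Int), i ≤ j0 →
    (∀ (k : Nat) (hk : k < sl.length), i ≤ k → k < j0 → sl[k] ≠ ch) →
    times ≤ tOE + 1 → (i = 0 → times + 1 ≤ tOE + 1) →
    j0 - i < fuel →
    pvWhile sl ch tOE fuel (times, (i : Int)) =
      ((if i = 0 then times + 1 else times), PySem.Int.mod ((j0 : Int) + 1) (sl.length : Int)) := by
  intro fuel
  induction fuel with
  | zero => intro i times _ _ _ _ hf; omega
  | succ f ihf =>
    intro i times hij hnone hguard hbump hf
    have hi : i < sl.length := by omega
    rw [pvWhile]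
    simp only [hguard, if_true]
    rw [show ((i : Int)) = ((i : Nat) : Int) from rfl, PySem.List.pyGet?_natCast,
      List.getElem?_eq_getElem hi]
    have hbeq : (((i : Nat) : Int) == 0) = decide (i = 0) := by
      by_cases h : i = 0 <;> simp [h]
    rcases Nat.lt_or_ge i j0 with hlt | hge
    · -- sl[i] ≠ ch : keep scanning
      have hne : sl[i] ≠ ch := hnone i hi (le_refl _) hlt
      simp only [hbeq, beq_iff_eq, hne, if_false]
      have hmod : PySem.Int.mod (((i : Nat) : Int) + 1) ((sl.length : Nat) : Int)
          = (((i + 1) : Nat) : Int) := by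
        have : (((i : Nat) : Int) + 1) = (((i + 1 : Nat)) : Int) := by push_cast; ring
        rw [this, PySem.Int.mod_natCast, Nat.mod_eq_of_lt (by omega)]
      rw [hmod]
      have := ihf (i + 1) (if decide (i = 0) = true then times + 1 else times)
        (by omega) (fun k hk h1 h2 => hnone k hk (by omega) h2)
        (by by_cases h : i = 0
            · have := hbump h; simp [h]; omega
            · simp [h]; exact hguard)
        (by omega) (by omega)
      rw [this]
      by_cases h : i = 0 <;> simp [h]
    · -- i = j0 : found, break
      have : i = j0 := by omega
      subst this
      simp only [hbeq, beq_iff_eq, hch, if_true]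
      have : PySem.Int.mod (((i : Nat) : Int) + 1) ((sl.length : Nat) : Int)
          = PySem.Int.mod (((i : Nat) : Int) + 1) (sl.length : Int) := rfl
      by_cases h : i = 0 <;> simp [h]

theorem pvWhile_wrap (sl : List Char) (ch : Char) (tOE : Int) (j0 : Nat)
    (hj : j0 < sl.length) (hch : sl[j0] = ch)
    (hleast : ∀ (k : Nat) (hk : k < sl.length), k < j0 → sl[k] ≠ ch) :
    ∀ (fuel i : Nat), 1 ≤ i → i < sl.length →
    (∀ (k : Nat) (hk : k < sl.length), i ≤ k → sl[k] ≠ ch) →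
    (sl.length - i) + j0 < fuel →
    pvWhile sl ch tOE fuel (tOE, (i : Int)) =
      (tOE + 1, PySem.Int.mod ((j0 : Int) + 1) (sl.length : Int)) := by
  intro fuel
  induction fuel with
  | zero => intro i _ hin _ hf; omega
  | succ f ihf =>
    intro i hi1 hin hnot hf
    rw [pvWhile]
    simp only [le_refl, Int.le_add_one, if_true]
    have hbeq : (((i : Nat) : Int) == 0) = false := by
      simp; omega
    rw [show ((i : Int)) = ((i : Nat) : Int) from rfl, hbeq, PySem.List.pyGet?_natCast,
      List.getElem?_eq_getElem hin]
    simp only [Bool.false_eq_true, if_false, beq_iff_eq, hnot i hin (le_refl _), if_false]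
    have hmod : PySem.Int.mod (((i : Nat) : Int) + 1) ((sl.length : Nat) : Int)
        = ((((i + 1) % sl.length) : Nat) : Int) := by
      have : (((i : Nat) : Int) + 1) = (((i + 1 : Nat)) : Int) := by push_cast; ring
      rw [this, PySem.Int.mod_natCast]
    rw [hmod]
    rcases Nat.lt_or_ge (i + 1) sl.length with hlt | hge
    · rw [Nat.mod_eq_of_lt hlt]
      exact ihf (i + 1) (by omega) hlt (fun k hk h1 => hnot k hk (by omega)) (by omega)
    · have hn : i + 1 = sl.length := by omega
      rw [hn, Nat.mod_self]
      have := pvWhile_found sl ch tOE j0 hj hch f 0 tOE (Nat.zero_le _)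
        (fun k hk _ h2 => hleast k hk h2) (by omega) (fun _ => by omega) (by omega)
      rw [this]
      simp

-- one step of B equals one step of A, for a char present in s and a position 0 ≤ p < n
theorem step_eq (sl : List Char) (ch : Char) (p : Nat) (times : Int)
    (hn : 0 < sl.length) (hp : p < sl.length) (hmem : ch ∈ sl) :
    ∃ (p' : Nat), p' < sl.length ∧
      pvWhile sl ch times (2 * sl.length + 2) (times, (p : Int)) =
        (( let lst := occList sl ch
           let times1 := if (p : Int) == 0 then times + 1 else times
           let lo := pvBisect lst (p : Int) 0 lst.length
           if lo == lst.length then times1 + 1 else times1), (p' : Int)) ∧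
      ( let lst := occList sl ch
        let lo := pvBisect lst (p : Int) 0 lst.length
        if lo == lst.length then
          PySem.Int.mod (PySem.List.pyGetD lst (0:Int) 0 + 1) (sl.length : Int) = (p' : Int)
        else
          PySem.Int.mod (PySem.List.pyGetD lst ((lo : Nat) : Int) 0 + 1) (sl.length : Int) = (p' : Int)) := by
  obtain ⟨kx, hkx, hkxc⟩ := List.mem_iff_getElem.mp hmem
  set lst := occList sl ch with hlst
  have hs := pairwise_occList sl ch
  rw [← hlst] at hs
  have hmemlst : ∀ (k : Nat) (hk : k < sl.length), sl[k] = ch → ((k : Int) ∈ lst) :=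
    fun k hk hc => (mem_occList sl ch (k : Int)).mpr ⟨k, hk, rfl, hc⟩
  have hlen0 : 0 < lst.length :=
    List.length_pos_of_mem (hmemlst kx hkx hkxc)
  have hnonneg : ∀ (q : Nat) (hq : q < lst.length), 0 ≤ lst[q] := by
    intro q hq
    have hmem' := (mem_occList sl ch lst[q]).mp (List.getElem_mem hq)
    obtain ⟨k, hk, he, _⟩ := hmem'
    omega
  obtain ⟨hlo0, hlole, hbelow, habove⟩ := pvBisect_spec lst (p : Int) hs lst.length 0
    lst.length (by omega) (Nat.zero_le _) (le_refl _)
    (by intro j hj h; omega) (by intro j hj h; omega)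
  set lo := pvBisect lst ((p : Nat) : Int) 0 lst.length with hlo
  have hbeq : (((p : Nat) : Int) == 0) = decide (p = 0) := by
    by_cases h : p = 0 <;> simp [h]
  have hmodcast : ∀ (k : Nat), PySem.Int.mod ((k : Int) + 1) (sl.length : Int)
      = ((((k + 1) % sl.length) : Nat) : Int) := by
    intro k
    have : ((k : Int) + 1) = (((k + 1 : Nat)) : Int) := by push_cast; ring
    rw [this]
    exact PySem.Int.mod_natCast _ _
  rcases Nat.lt_or_ge lo lst.length with hlt | hge
  · -- an occurrence at position ≥ p exists; lst[lo] is the least one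
    obtain ⟨k, hk, hlok, hkc⟩ := (mem_occList sl ch lst[lo]).mp (List.getElem_mem hlt)
    have hpk : p ≤ k := by
      have := habove lo hlt (le_refl _)
      omega
    have hmin : ∀ (m : Nat) (hm : m < sl.length), p ≤ m → m < k → sl[m] ≠ ch := by
      intro m hm h1 h2 hc
      obtain ⟨q, hq, hqe⟩ := List.mem_iff_getElem.mp (hmemlst m hm hc)
      rcases Nat.lt_trichotomy q lo with h3 | h3 | h3
      · have := hbelow q hq h3
        omega
      · subst h3
        omega
      · have := (List.pairwise_iff_getElem.mp hs) lo q hlt hq h3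
        omega
    have hA := pvWhile_found sl ch times k hk hkc (2 * sl.length + 2) p times hpk
      hmin (by omega) (fun _ => le_refl _) (by omega)
    refine ⟨(k + 1) % sl.length, Nat.mod_lt _ hn, ?_, ?_⟩
    · rw [hA]; dsimp only; rw [← hlo]
      have hne : (lo == lst.length) = false := by simp; omega
      simp only [hne, hbeq, Bool.false_eq_true, if_false]
      rw [hmodcast k]
      simp only [decide_eq_true_eq]
    · dsimp only; rw [← hlo]
      have hne : (lo == lst.length) = false := by simp; omega
      simp only [hne, Bool.false_eq_true, if_false]
      rw [PySem.List.pyGetD_ofNat lst lo 0 hlt, hlok, hmodcast k]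
  · -- no occurrence at position ≥ p : wrap around to the first occurrence lst[0]
    have hloeq : lo = lst.length := by omega
    have hp1 : 1 ≤ p := by
      by_contra h
      have hp0 : p = 0 := by omega
      have h1 := hbelow 0 hlen0 (by omega)
      have h2 := hnonneg 0 hlen0
      omega
    obtain ⟨k0, hk0, h0k, hk0c⟩ := (mem_occList sl ch lst[0]).mp (List.getElem_mem hlen0)
    have hleast : ∀ (m : Nat) (hm : m < sl.length), m < k0 → sl[m] ≠ ch := by
      intro m hm h2 hc
      obtain ⟨q, hq, hqe⟩ := List.mem_iff_getElem.mp (hmemlst m hm hc)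
      rcases Nat.eq_zero_or_pos q with h3 | h3
      · subst h3
        omega
      · have := (List.pairwise_iff_getElem.mp hs) 0 q hlen0 hq h3
        omega
    have hnot : ∀ (m : Nat) (hm : m < sl.length), p ≤ m → sl[m] ≠ ch := by
      intro m hm h1 hc
      obtain ⟨q, hq, hqe⟩ := List.mem_iff_getElem.mp (hmemlst m hm hc)
      have := hbelow q hq (by omega)
      omega
    have hA := pvWhile_wrap sl ch times k0 hk0 hk0c (fun m hm h2 => hleast m hm h2)
      (2 * sl.length + 2) p hp1 hp hnot (by omega)
    refine ⟨(k0 + 1) % sl.length, Nat.mod_lt _ hn, ?_, ?_⟩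
    · rw [hA]; dsimp only; rw [← hlo]
      have heq : (lo == lst.length) = true := by simp [hloeq]
      simp only [heq, hbeq, if_true]
      rw [hmodcast k0]
      have hne0 : p ≠ 0 := by omega
      simp only [decide_eq_true_eq]
      rw [if_neg hne0]
    · dsimp only; rw [← hlo]
      have heq : (lo == lst.length) = true := by simp [hloeq]
      simp only [heq, if_true]
      rw [PySem.List.pyGetD_zero, List.getD_eq_getElem _ _ hlen0, h0k, hmodcast k0]

theorem altLoop_missing (sl : List Char) (tl : List Char)
    (hmiss : ∃ ch ∈ tl, ch ∉ sl) :
    ∀ (times pos : Int), pvAltLoop sl (pvBuildOcc sl) tl times pos = -1 := by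
  induction tl with
  | nil => obtain ⟨ch, hch, -⟩ := hmiss; simp at hch
  | cons ch rest ih =>
    intro times pos
    rw [pvAltLoop, buildOcc_get? sl ch]
    by_cases h : ch ∈ sl
    · obtain ⟨ch', hch', hnot'⟩ := hmiss
      have hrest : ch' ∈ rest := by
        rcases List.mem_cons.mp hch' with h1 | h1
        · exact absurd (h1 ▸ h) hnot'
        · exact h1
      simp only [h, if_true]
      split <;> exact ih ⟨ch', hrest, hnot'⟩ _ _
    · simp [h]

theorem loops_eq (sl : List Char) (hn : 0 < sl.length) :
    ∀ (tl : List Char) (times : Int) (p : Nat), p < sl.length →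
    (∀ ch ∈ tl, ch ∈ sl) →
    pvAltLoop sl (pvBuildOcc sl) tl times (p : Int) =
      (tl.foldl (fun (st : Int × Int) ch => pvWhile sl ch st.1 (2 * sl.length + 2) st) (times, (p : Int))).1 := by
  intro tl
  induction tl with
  | nil => intro times p _ _; rfl
  | cons ch rest ih =>
    intro times p hp hall
    have hch : ch ∈ sl := hall ch (List.mem_cons_self ..)
    obtain ⟨p', hp', hA, hB⟩ := step_eq sl ch p times hn hp hch
    rw [pvAltLoop, buildOcc_get? sl ch]
    simp only [hch, if_true, List.foldl_cons, hA]
    dsimp only at hB ⊢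
    by_cases hc : (pvBisect (occList sl ch) ((p : Nat) : Int) 0 (occList sl ch).length ==
        (occList sl ch).length) = true
    · simp only [if_pos hc] at hB ⊢
      rw [hB]
      exact ih _ p' hp' (fun c hc' => hall c (List.mem_cons_of_mem _ hc'))
    · simp only [if_neg hc] at hB ⊢
      rw [hB]
      exact ih _ p' hp' (fun c hc' => hall c (List.mem_cons_of_mem _ hc'))

theorem contains_iff (sl tl : List Char) :
    pvContainsChars sl tl = true ↔ ∀ ch ∈ tl, ch ∈ sl := by
  have hfold : ∀ (xs : List Char) (d : PySem.Set Char),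
      xs.foldl (fun d ch => if PySem.Set.contains d ch then d else PySem.Set.add d ch) d =
      xs.foldl PySem.Set.add d := by
    intro xs
    induction xs with
    | nil => intro d; rfl
    | cons x xs ih =>
      intro d
      simp only [List.foldl_cons, ih]
      congr 1
      by_cases h : PySem.Set.contains d x
      · rw [if_pos h]
        rw [PySem.Set.contains_iff] at h
        simp [PySem.Set.add, h]
      · rw [if_neg h]
  unfold pvContainsChars
  rw [hfold]
  have hof : List.foldl PySem.Set.add PySem.Set.empty sl = PySem.Set.ofList sl :=
    (PySem.Set.ofList_eq_foldl sl).symm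
  rw [hof, List.all_eq_true]
  constructor
  · intro h ch hch
    have := h ch hch
    rw [PySem.Set.contains_iff] at this
    exact (PySem.Set.mem_ofList sl ch).mp this
  · intro h ch hch
    rw [PySem.Set.contains_iff]
    exact (PySem.Set.mem_ofList sl ch).mpr (h ch hch)

-- ===== VERDICT (by name: the statement is the Claim_ definition above) =====
theorem times_repeated_spec : Claim_equal_times_repeated := by
  intro s t _
  unfold Spec_times_repeated times_repeated times_repeated_alt
  dsimp only
  by_cases hc : pvContainsChars s.toList t.toList
  · rw [if_pos hc]
    have hall : ∀ ch ∈ t.toList, ch ∈ s.toList := (contains_iff _ _).mp hc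
    rcases List.eq_nil_or_concat s.toList with hnil | hcon
    · have htl : t.toList = [] := by
        cases htl : t.toList with
        | nil => rfl
        | cons c cs =>
          have := hall c (by rw [htl]; exact List.mem_cons_self ..)
          rw [hnil] at this
          simp at this
      rw [hnil, htl]
      rfl
    · have hn : 0 < s.toList.length := by
        obtain ⟨ys, y, hy⟩ := hcon
        rw [hy]
        simp
      exact (loops_eq s.toList hn t.toList 0 0 hn hall).symm
  · rw [if_neg hc]
    have hmiss : ∃ ch ∈ t.toList, ch ∉ s.toList := by
      by_contra h
      push Not at h
      exact hc ((contains_iff _ _).mpr h)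
    rw [altLoop_missing s.toList t.toList hmiss 0 0]
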